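-- pv_equiv track=rewrite | github.com/TGM-HWI-SWP/B.I.E.R | src/bierapp/frontend/flask/gui.py | _estimate_pick_route
-- ===== SOURCE A (Python) =====
-- def _estimate_pick_route(items: list, product_by_id: dict) -> tuple[str, int]:
--     """Estimate optimized pick route and path length by warehouse zones.
--
--     Args:
--         items: Pick items containing product IDs and quantities.
--         product_by_id: Lookup map for product documents.
--
--     Returns:
--         Tuple of route string and estimated distance in meters.
--     """
--     zone_coords = {
--         "A": (0, 0),
--         "B": (12, 0),
--         "C": (24, 0),
--         "D": (36, 0),
--         "E": (0, 14),
--         "F": (12, 14),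
--         "G": (24, 14),
--         "H": (36, 14),
--     }
--     start = (0, -6)
--
--     route_nodes = []
--     for item in items:
--         product = product_by_id.get(item.get("produkt_id", ""), {})
--         zone = str(product.get("lagerzone", product.get("lagerbereich", "A"))).strip() or "A"
--         product_name = product.get("name", "-")
--         route_nodes.append((zone, product_name))
--
--     route_nodes.sort(key=lambda node: (node[0], node[1]))
--     if not route_nodes:
--         return ("", 0)
--
--     route_parts = []
--     total_distance = 0
--     current = start
--     for zone, product_name in route_nodes:
--         target = zone_coords.get(zone, (0, 0))
--         total_distance += abs(target[0] - current[0]) + abs(target[1] - current[1])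
--         route_parts.append(f"{zone}:{product_name}")
--         current = target
--
--     total_distance += abs(current[0] - start[0]) + abs(current[1] - start[1])
--     route = " -> ".join(route_parts)
--     return (route, int(total_distance))
-- ===== SOURCE B (Python) =====
-- def _estimate_pick_route(items: list, product_by_id: dict) -> tuple[str, int]:
--     zone_coords = {
--         "A": (0, 0),
--         "B": (12, 0),
--         "C": (24, 0),
--         "D": (36, 0),
--         "E": (0, 14),
--         "F": (12, 14),
--         "G": (24, 14),
--         "H": (36, 14),
--     }
--     start = (0, -6)
--
--     if not items:
--         return ("", 0)
--
--     # Group product names by (normalized) zone instead of sorting one big pair list.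
--     buckets = {}
--     for item in items:
--         product = product_by_id.get(item.get("produkt_id", ""), {})
--         zone = str(product.get("lagerzone", product.get("lagerbereich", "A"))).strip() or "A"
--         buckets[zone] = buckets.get(zone, []) + [product.get("name", "-")]
--
--     zones = sorted(buckets)
--     parts = [f"{zone}:{name}" for zone in zones for name in sorted(buckets[zone])]
--
--     # Repeated visits inside one zone cost 0, so the distance only depends on the
--     # distinct zones in sorted order: walk start -> zone coords -> start.
--     coords = [zone_coords.get(zone, (0, 0)) for zone in zones]
--     total = 0
--     prev = start
--     for cur in coords + [start]:
--         total += abs(cur[0] - prev[0]) + abs(cur[1] - prev[1])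
--         prev = cur
--
--     return (" -> ".join(parts), int(total))
-- ===== Notes on version B (the rewrite author's own statement) =====
-- stated objective: alternative
-- what changed: B replaces A's global sort of (zone,name) pairs plus one interleaved accumulator loop (route parts + running distance + current position) by a group-by: a dict bucketing names per zone, zones and per-zone names sorted separately, the route built by a nested comprehension, and the distance walked over the distinct zones only (repeat visits inside a zone cost 0).
import Mathlib
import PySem

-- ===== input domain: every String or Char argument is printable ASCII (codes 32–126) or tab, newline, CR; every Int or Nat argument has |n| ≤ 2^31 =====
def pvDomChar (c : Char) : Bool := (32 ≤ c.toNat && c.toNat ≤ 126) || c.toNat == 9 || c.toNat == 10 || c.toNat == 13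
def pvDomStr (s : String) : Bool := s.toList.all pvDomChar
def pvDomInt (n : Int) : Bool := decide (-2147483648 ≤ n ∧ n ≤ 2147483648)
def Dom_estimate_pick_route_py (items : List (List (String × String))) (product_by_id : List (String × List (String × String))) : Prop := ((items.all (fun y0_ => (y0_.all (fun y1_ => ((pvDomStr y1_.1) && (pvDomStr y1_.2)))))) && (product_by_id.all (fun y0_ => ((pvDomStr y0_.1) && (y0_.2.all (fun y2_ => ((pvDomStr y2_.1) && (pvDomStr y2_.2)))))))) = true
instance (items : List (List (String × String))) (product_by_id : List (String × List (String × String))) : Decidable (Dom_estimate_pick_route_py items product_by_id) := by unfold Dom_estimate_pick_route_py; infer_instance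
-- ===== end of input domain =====

-- B groups product names by zone in a dict, sorts the zones and each zone's names separately,
-- and walks the distance over the distinct zones only (repeat visits in a zone cost 0) —
-- a group-by decomposition instead of A's global pair sort with an interleaved accumulator loop.

-- ===== PORT A =====
-- shared literal constants of the Python source
def pvZoneCoords : PySem.Dict String (Int × Int) :=
  PySem.Dict.ofList [("A", (0, 0)), ("B", (12, 0)), ("C", (24, 0)), ("D", (36, 0)),
                     ("E", (0, 14)), ("F", (12, 14)), ("G", (24, 14)), ("H", (36, 14))]

def pvStart : Int × Int := (0, -6)

-- the per-item node computation (identical expression in A and B)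
def pvNode (product_by_id : List (String × List (String × String))) (item : List (String × String)) : String × String :=
  let product := (PySem.Dict.mk product_by_id).getD ((PySem.Dict.mk item).getD "produkt_id" "") []
  let pd := PySem.Dict.mk product
  let zone0 := PySem.Str.strip (pd.getD "lagerzone" (pd.getD "lagerbereich" "A"))
  let zone := if zone0 = "" then "A" else zone0
  (zone, pd.getD "name" "-")

def estimate_pick_route_py (items : List (List (String × String))) (product_by_id : List (String × List (String × String))) : String × Int :=
  let route_nodes := items.foldl (fun acc item => acc ++ [pvNode product_by_id item]) []
  let route_nodes := PySem.List.sorted2 route_nodes (fun n => n.1) (fun n => n.2)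
  if route_nodes = [] then ("", 0)
  else
    let st := route_nodes.foldl
      (fun (st : List String × Int × (Int × Int)) node =>
        let target := pvZoneCoords.getD node.1 (0, 0)
        (st.1 ++ [node.1 ++ ":" ++ node.2],
         st.2.1 + |target.1 - st.2.2.1| + |target.2 - st.2.2.2|,
         target))
      ([], 0, pvStart)
    let total := st.2.1 + |st.2.2.1 - pvStart.1| + |st.2.2.2 - pvStart.2|
    (PySem.Str.join " -> " st.1, total)

-- ===== PORT B =====
def estimate_pick_route_py_alt (items : List (List (String × String))) (product_by_id : List (String × List (String × String))) : String × Int :=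
  if items = [] then ("", 0)
  else
    -- buckets[zone] = buckets.get(zone, []) + [name]
    let buckets := items.foldl
      (fun (d : PySem.Dict String (List String)) item =>
        let n := pvNode product_by_id item
        d.modify n.1 [] (fun old => old ++ [n.2]))
      PySem.Dict.empty
    let zones := PySem.List.sorted buckets.keys (fun z => z)
    let parts := zones.flatMap (fun z =>
      (PySem.List.sorted (buckets.getD z []) (fun s => s)).map (fun name => z ++ ":" ++ name))
    let coords := zones.map (fun z => pvZoneCoords.getD z (0, 0))
    let st := (coords ++ [pvStart]).foldl
      (fun (st : Int × (Int × Int)) cur => (st.1 + |cur.1 - st.2.1| + |cur.2 - st.2.2|, cur))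
      (0, pvStart)
    (PySem.Str.join " -> " parts, st.1)

-- ===== PRECONDITION & SPEC =====
def Spec_estimate_pick_route_py (items : List (List (String × String))) (product_by_id : List (String × List (String × String))) (out : String × Int) : Prop := out = estimate_pick_route_py_alt items product_by_id
instance (items : List (List (String × String))) (product_by_id : List (String × List (String × String))) (out : String × Int) : Decidable (Spec_estimate_pick_route_py items product_by_id out) := by unfold Spec_estimate_pick_route_py; infer_instance

-- ===== CLAIM (what is proved, stated in full; the proofs are below) =====
def Claim_equal_estimate_pick_route_py : Prop := ∀ (items : List (List (String × String))) (product_by_id : List (String × List (String × String))), Dom_estimate_pick_route_py items product_by_id → Spec_estimate_pick_route_py items product_by_id (estimate_pick_route_py items product_by_id)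

-- ===== LEMMAS AND PROOFS =====

-- the lexicographic key of a node
def pvKey (n : String × String) : Lex (String × String) := toLex n

-- names grouped under one zone, and B's sorted distinct-zone list, as plain functions of the node list
def pvNames (nodes : List (String × String)) (z : String) : List String :=
  (nodes.filter (fun p => p.1 == z)).map (fun p => p.2)

def pvZones (nodes : List (String × String)) : List String :=
  PySem.List.sorted (PySem.Set.ofList (nodes.map (fun p => p.1))) (fun z => z)

-- the grouped form of the sorted node list
def pvGroups (nodes : List (String × String)) : List (String × String) :=
  (pvZones nodes).flatMap (fun z =>
    (PySem.List.sorted (pvNames nodes z) (fun s => s)).map (fun nm => (z, nm)))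

-- manhattan segment sum from a current point through a list of targets
def pvSegSum (cur : Int × Int) : List (Int × Int) → Int
  | [] => 0
  | t :: ts => (|t.1 - cur.1| + |t.2 - cur.2|) + pvSegSum t ts

def pvLastOf (cur : Int × Int) : List (Int × Int) → Int × Int
  | [] => cur
  | t :: ts => pvLastOf t ts

-- A's interleaved loop, characterised
theorem pvLoopA_spec (ns : List (String × String)) (parts : List String) (dist : Int) (cur : Int × Int) :
    ns.foldl
      (fun (st : List String × Int × (Int × Int)) node =>
        let target := pvZoneCoords.getD node.1 (0, 0)
        (st.1 ++ [node.1 ++ ":" ++ node.2],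
         st.2.1 + |target.1 - st.2.2.1| + |target.2 - st.2.2.2|,
         target))
      (parts, dist, cur)
    = (parts ++ ns.map (fun n => n.1 ++ ":" ++ n.2),
       dist + pvSegSum cur (ns.map (fun n => pvZoneCoords.getD n.1 (0, 0))),
       pvLastOf cur (ns.map (fun n => pvZoneCoords.getD n.1 (0, 0)))) := by
  induction ns generalizing parts dist cur with
  | nil => simp [pvSegSum, pvLastOf]
  | cons n ns ih =>
      simp only [List.foldl_cons, List.map_cons, pvSegSum, pvLastOf, ih, Prod.mk.injEq]
      refine ⟨by simp, by ring_nf, by simp⟩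

-- B's distance loop, characterised
theorem pvLoopB_spec (cs : List (Int × Int)) (dist : Int) (cur : Int × Int) :
    cs.foldl (fun (st : Int × (Int × Int)) c => (st.1 + |c.1 - st.2.1| + |c.2 - st.2.2|, c)) (dist, cur)
      = (dist + pvSegSum cur cs, pvLastOf cur cs) := by
  induction cs generalizing dist cur with
  | nil => simp [pvSegSum, pvLastOf]
  | cons c cs ih => simp [pvSegSum, pvLastOf, ih]; ring

theorem pvSegSum_append_singleton (cs : List (Int × Int)) (cur fin : Int × Int) :
    pvSegSum cur (cs ++ [fin])
      = pvSegSum cur cs + (|fin.1 - (pvLastOf cur cs).1| + |fin.2 - (pvLastOf cur cs).2|) := by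
  induction cs generalizing cur with
  | nil => simp [pvSegSum, pvLastOf]
  | cons t ts ih => simp [pvSegSum, pvLastOf, ih]; ring

-- a block of equal coordinates costs one hop
theorem pvSegSum_const_block {β : Type} (ns : List β) (hne : ns ≠ []) (c cur : Int × Int) (rest : List (Int × Int)) :
    pvSegSum cur (ns.map (fun _ => c) ++ rest)
      = (|c.1 - cur.1| + |c.2 - cur.2|) + pvSegSum c rest := by
  induction ns generalizing cur with
  | nil => exact absurd rfl hne
  | cons n ns ih =>
      cases ns with
      | nil => simp [pvSegSum]
      | cons m ms =>
          have h2 := ih (by simp) c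
          simp only [List.map_cons, List.cons_append, pvSegSum] at h2 ⊢
          rw [h2]
          simp

-- collapsing constant blocks: the walk over grouped coordinates is the walk over the distinct zones
theorem pvSegSum_flat (zs : List String) (f : String → List String) (coord : String → Int × Int)
    (h : ∀ z ∈ zs, f z ≠ []) (cur : Int × Int) (tail : List (Int × Int)) :
    pvSegSum cur (zs.flatMap (fun z => (f z).map (fun _ => coord z)) ++ tail)
      = pvSegSum cur (zs.map coord ++ tail) := by
  induction zs generalizing cur with
  | nil => simp
  | cons z zs ih =>
      simp only [List.flatMap_cons, List.map_cons, List.append_assoc, List.cons_append]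
      rw [pvSegSum_const_block (f z) (h z (by simp)) (coord z) cur]
      simp only [pvSegSum]
      rw [ih (fun w hw => h w (by simp [hw])) (coord z)]

-- perm of flatMap under pointwise perms
theorem pvFlatMap_perm {α β : Type} (zs : List α) (f g : α → List β)
    (h : ∀ z ∈ zs, (f z).Perm (g z)) : (zs.flatMap f).Perm (zs.flatMap g) := by
  induction zs with
  | nil => simp
  | cons z zs ih =>
      simp only [List.flatMap_cons]
      exact (h z (by simp)).append (ih (fun w hw => h w (by simp [hw])))

-- distributing a list over distinct covering keys is a permutation
theorem pvFilter_cover_perm (zs : List String) (l : List (String × String))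
    (hnd : zs.Nodup) (hcov : ∀ p ∈ l, p.1 ∈ zs) :
    (zs.flatMap (fun z => l.filter (fun p => p.1 == z))).Perm l := by
  induction zs generalizing l with
  | nil =>
      cases l with
      | nil => simp
      | cons p l => exact absurd (hcov p (by simp)) (by simp)
  | cons z zs ih =>
      simp only [List.flatMap_cons]
      have hrw : zs.flatMap (fun w => l.filter (fun p => p.1 == w))
          = zs.flatMap (fun w => (l.filter (fun p => !(p.1 == z))).filter (fun p => p.1 == w)) := by
        refine List.flatMap_congr (fun w hw => ?_)
        rw [List.filter_filter]
        refine (List.filter_congr (fun p _ => ?_)).symm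
        rcases eq_or_ne p.1 w with h | h
        · have : w ≠ z := fun hzw => (List.nodup_cons.mp hnd).1 (hzw ▸ hw)
          simp [h, this]
        · simp [h]
      rw [hrw]
      have hsub : ∀ p ∈ l.filter (fun p => !(p.1 == z)), p.1 ∈ zs := by
        intro p hp
        have hm := List.of_mem_filter hp
        have := hcov p (List.mem_of_mem_filter hp)
        simp only [List.mem_cons] at this
        rcases this with h | h
        · simp [h] at hm
        · exact h
      exact ((ih _ (List.nodup_cons.mp hnd).2 hsub).append_left _).trans
        (List.filter_append_perm _ l)

-- sorted2 with the two projections IS sorting by the lexicographic key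
theorem pvSorted2_eq_sorted_lex (xs : List (String × String)) :
    PySem.List.sorted2 xs (fun n => n.1) (fun n => n.2) = PySem.List.sorted xs pvKey := by
  simp only [PySem.List.sorted2, PySem.List.sorted]
  congr 1
  funext acc x
  congr 1
  funext a b
  show (decide (a.1 < b.1) || (!decide (b.1 < a.1) && decide (a.2 < b.2))) = decide (pvKey a < pvKey b)
  have ha : pvKey a = toLex (a.1, a.2) := rfl
  have hb : pvKey b = toLex (b.1, b.2) := rfl
  rw [ha, hb]
  rcases lt_trichotomy a.1 b.1 with h | h | h <;>
    simp [Prod.Lex.toLex_lt_toLex, h, not_lt_of_gt]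

theorem pvKey_injective : Function.Injective pvKey := fun _ _ h => h

-- every zone of pvZones has a nonempty name list
theorem pvNames_ne_nil (nodes : List (String × String)) (z : String) (hz : z ∈ pvZones nodes) :
    pvNames nodes z ≠ [] := by
  unfold pvZones at hz
  rw [PySem.List.mem_sorted, PySem.Set.mem_ofList, List.mem_map] at hz
  obtain ⟨p, hp, hpz⟩ := hz
  unfold pvNames
  simp only [ne_eq, List.map_eq_nil_iff, List.filter_eq_nil_iff, not_forall]
  exact ⟨p, hp, by simp [hpz]⟩

-- the central fact: A's globally sorted node list is B's grouped form
theorem pvSorted_eq_groups (nodes : List (String × String)) :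
    PySem.List.sorted2 nodes (fun n => n.1) (fun n => n.2) = pvGroups nodes := by
  rw [pvSorted2_eq_sorted_lex]
  -- pvGroups ~ nodes
  have hperm1 : ((pvZones nodes).flatMap (fun z =>
      (PySem.List.sorted (pvNames nodes z) (fun s => s)).map (fun nm => (z, nm)))).Perm
      ((pvZones nodes).flatMap (fun z => nodes.filter (fun p => p.1 == z))) := by
    refine pvFlatMap_perm _ _ _ (fun z _ => ?_)
    have h1 : ((PySem.List.sorted (pvNames nodes z) (fun s => s)).map (fun nm => (z, nm))).Perm
        ((pvNames nodes z).map (fun nm => (z, nm))) :=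
      (PySem.List.sorted_perm _ _ _).map _
    refine h1.trans (List.Perm.of_eq ?_)
    unfold pvNames
    rw [List.map_map]
    refine (List.map_congr_left (fun p hp => ?_)).trans (List.map_id _)
    have := List.of_mem_filter hp
    simp only [beq_iff_eq] at this
    exact Prod.ext this.symm rfl
  have hzn : (pvZones nodes).Nodup :=
    ((PySem.List.sorted_perm _ _ _).nodup_iff).mpr (PySem.Set.nodup_ofList _)
  have hcov : ∀ p ∈ nodes, p.1 ∈ pvZones nodes := by
    intro p hp
    unfold pvZones
    rw [PySem.List.mem_sorted, PySem.Set.mem_ofList]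
    exact List.mem_map_of_mem hp
  have hperm : (pvGroups nodes).Perm nodes :=
    hperm1.trans (pvFilter_cover_perm _ _ hzn hcov)
  -- both sides pairwise ≤ under pvKey, both perm of nodes
  refine PySem.List.eq_of_perm_of_pairwise_le_of_injective pvKey pvKey_injective
    ((PySem.List.sorted_perm _ _ _).trans hperm.symm)
    (PySem.List.sorted_pairwise _ _) ?_
  -- pairwise for the grouped form
  unfold pvGroups
  rw [List.flatMap_def, List.pairwise_flatten]
  constructor
  · intro l hl
    rw [List.mem_map] at hl
    obtain ⟨z, _, rfl⟩ := hl
    rw [List.pairwise_map]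
    refine (PySem.List.sorted_pairwise (pvNames nodes z) (fun s => s)).imp ?_
    intro a b hab
    show pvKey (z, a) ≤ pvKey (z, b)
    exact Prod.Lex.toLex_le_toLex.mpr (Or.inr ⟨rfl, hab⟩)
  · rw [List.pairwise_map]
    refine (PySem.List.sorted_ofList_pairwise_lt (nodes.map (fun p => p.1))).imp ?_
    intro z1 z2 h12 x hx y hy
    rw [List.mem_map] at hx hy
    obtain ⟨nm1, _, rfl⟩ := hx
    obtain ⟨nm2, _, rfl⟩ := hy
    show pvKey (z1, nm1) ≤ pvKey (z2, nm2)
    exact Prod.Lex.toLex_le_toLex.mpr (Or.inl h12)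

-- ===== VERDICT (by name: the statement is the Claim_ definition above) =====
-- B's grouping loop over items is the grouping loop over the node list
theorem pvBuckets_eq (items : List (List (String × String))) (product_by_id : List (String × List (String × String))) :
    items.foldl
      (fun (d : PySem.Dict String (List String)) item =>
        let n := pvNode product_by_id item
        d.modify n.1 [] (fun old => old ++ [n.2]))
      PySem.Dict.empty
    = (items.map (pvNode product_by_id)).foldl
        (fun d p => d.modify p.1 [] (fun old => old ++ [p.2])) PySem.Dict.empty := by
  rw [List.foldl_map]

theorem pvBuckets_getD (items : List (List (String × String))) (product_by_id : List (String × List (String × String))) (z : String) :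
    ((items.map (pvNode product_by_id)).foldl
        (fun (d : PySem.Dict String (List String)) p => d.modify p.1 [] (fun old => old ++ [p.2])) PySem.Dict.empty).getD z []
      = pvNames (items.map (pvNode product_by_id)) z := by
  rw [PySem.Dict.getD_foldl_modify_append]
  simp [pvNames, PySem.Dict.getD_empty]

theorem pvBuckets_keys (items : List (List (String × String))) (product_by_id : List (String × List (String × String))) :
    ((items.map (pvNode product_by_id)).foldl
        (fun (d : PySem.Dict String (List String)) p => d.modify p.1 [] (fun old => old ++ [p.2])) PySem.Dict.empty).keys
      = PySem.Set.ofList ((items.map (pvNode product_by_id)).map (fun p => p.1)) := by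
  rw [PySem.Dict.keys_foldl_modify_key ((items.map (pvNode product_by_id))) (fun p => p.1) []
        (fun _ p => (fun old => old ++ [p.2]))]
  simp [PySem.Set.update, PySem.Set.ofList]

-- ===== VERDICT (by name: the statement is the Claim_ definition above) =====
theorem estimate_pick_route_py_spec : Claim_equal_estimate_pick_route_py := by
  intro items product_by_id _
  unfold Spec_estimate_pick_route_py estimate_pick_route_py estimate_pick_route_py_alt
  simp only [PySem.List.foldl_append_singleton_eq_map, List.nil_append, pvSorted_eq_groups,
    pvBuckets_eq, pvBuckets_getD, pvBuckets_keys]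
  by_cases h : items = []
  · simp [h, pvGroups, pvZones, pvNames, PySem.Set.ofList, PySem.Set.empty, PySem.List.sorted]
  · have hne : pvGroups (items.map (pvNode product_by_id)) ≠ [] := by
      rw [← pvSorted_eq_groups, pvSorted2_eq_sorted_lex]
      simp [PySem.List.sorted_eq_nil_iff, h]
    simp only [h, if_false, hne, if_false]
    rw [pvLoopA_spec, pvLoopB_spec]
    dsimp only
    simp only [List.nil_append, zero_add, pvGroups, pvZones, List.map_flatMap, List.map_map,
      Function.comp_def, Prod.mk.injEq]
    refine ⟨trivial, ?_⟩
    rw [abs_sub_comm _ pvStart.1, abs_sub_comm _ pvStart.2, add_assoc, ← pvSegSum_append_singleton,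
      pvSegSum_flat
        (PySem.List.sorted (PySem.Set.ofList (items.map (fun x => (pvNode product_by_id x).1))) (fun s => s))
        (fun z => PySem.List.sorted (pvNames (items.map (pvNode product_by_id)) z) (fun s => s))
        (fun z => pvZoneCoords.getD z (0, 0))
        (fun z hz => by
          rw [ne_eq, PySem.List.sorted_eq_nil_iff]
          exact pvNames_ne_nil _ z (by simpa [pvZones, List.map_map, Function.comp_def] using hz))
        pvStart [pvStart]]
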